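-- pv_equiv track=rewrite | github.com/dkmvfabio/esercizi_python | es1.py | competizione_con_meno_giudici
-- ===== SOURCE A (Python) =====
-- def competizione_con_meno_giudici(tupla_competizioni):
--     numeroMinoreGiudici = 1000
--     competizioneMinore = [(""),(""),0,0]
--     for nomeChef, piatto, punteggio, giudici in tupla_competizioni:
--         if(giudici<numeroMinoreGiudici):
--             numeroMinoreGiudici = giudici
--     for nomeChef, piatto, punteggio, giudici in tupla_competizioni:
--         if (numeroMinoreGiudici == giudici):
--             competizioneMinore[0] = nomeChef
--             competizioneMinore[1] = piatto
--             competizioneMinore[2] = punteggio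
--             competizioneMinore[3] = giudici
--     return competizioneMinore
-- ===== SOURCE B (Python) =====
-- def competizione_con_meno_giudici(tupla_competizioni):
--     numeroMinoreGiudici = 1000
--     competizioneMinore = [(""), (""), 0, 0]
--     for nomeChef, piatto, punteggio, giudici in tupla_competizioni:
--         if giudici < numeroMinoreGiudici:
--             numeroMinoreGiudici = giudici
--             competizioneMinore = [nomeChef, piatto, punteggio, giudici]
--         elif giudici == numeroMinoreGiudici:
--             competizioneMinore = [nomeChef, piatto, punteggio, giudici]
--     return competizioneMinore
-- ===== Notes on version B (the rewrite author's own statement) =====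
-- stated objective: simpler
-- what changed: Fused A's two scans (one to find the minimum judge count with a 1000 sentinel, one to find its last occurrence) into a single loop that tracks the running minimum and overwrites the best element on every new minimum or tie, preserving the sentinel default and last-match-wins.
import Mathlib
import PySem

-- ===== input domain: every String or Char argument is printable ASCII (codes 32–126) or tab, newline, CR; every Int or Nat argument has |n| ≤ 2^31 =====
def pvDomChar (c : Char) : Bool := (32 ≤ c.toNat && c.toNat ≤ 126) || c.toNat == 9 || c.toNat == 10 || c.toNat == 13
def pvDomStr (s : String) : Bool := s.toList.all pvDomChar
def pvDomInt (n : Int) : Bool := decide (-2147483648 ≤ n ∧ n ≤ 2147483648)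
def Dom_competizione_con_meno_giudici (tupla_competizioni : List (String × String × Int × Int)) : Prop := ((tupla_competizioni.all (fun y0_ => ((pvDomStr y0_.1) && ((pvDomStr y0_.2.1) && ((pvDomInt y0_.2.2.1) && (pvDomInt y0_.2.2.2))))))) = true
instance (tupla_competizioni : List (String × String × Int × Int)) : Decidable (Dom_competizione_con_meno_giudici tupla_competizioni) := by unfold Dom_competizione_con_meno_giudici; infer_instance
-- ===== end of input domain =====

-- B fuses A's two scans (min with 1000 sentinel, then last occurrence) into one single-pass loop; objective: simpler.

-- ===== PORT A =====
-- first loop: running minimum starting at the 1000 sentinel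
-- second loop: overwrite the result with every element whose giudici equals the minimum (last match wins)
def competizione_con_meno_giudici (tupla_competizioni : List (String × String × Int × Int)) : String × String × Int × Int :=
  let numeroMinoreGiudici : Int :=
    tupla_competizioni.foldl (fun m x => if x.2.2.2 < m then x.2.2.2 else m) 1000
  tupla_competizioni.foldl
    (fun r x => if numeroMinoreGiudici = x.2.2.2 then (x.1, x.2.1, x.2.2.1, x.2.2.2) else r)
    ("", "", 0, 0)

-- ===== PORT B =====
-- single pass: state = (running minimum, current best element)
def competizione_con_meno_giudici_alt (tupla_competizioni : List (String × String × Int × Int)) : String × String × Int × Int :=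
  (tupla_competizioni.foldl
    (fun (st : Int × (String × String × Int × Int)) x =>
      if x.2.2.2 < st.1 then (x.2.2.2, (x.1, x.2.1, x.2.2.1, x.2.2.2))
      else if x.2.2.2 = st.1 then (st.1, (x.1, x.2.1, x.2.2.1, x.2.2.2))
      else st)
    (1000, ("", "", 0, 0))).2

-- ===== PRECONDITION & SPEC =====
def Spec_competizione_con_meno_giudici (tupla_competizioni : List (String × String × Int × Int)) (out : String × String × Int × Int) : Prop := out = competizione_con_meno_giudici_alt tupla_competizioni
instance (tupla_competizioni : List (String × String × Int × Int)) (out : String × String × Int × Int) : Decidable (Spec_competizione_con_meno_giudici tupla_competizioni out) := by unfold Spec_competizione_con_meno_giudici; infer_instance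

-- ===== CLAIM (what is proved, stated in full; the proofs are below) =====
def Claim_equal_competizione_con_meno_giudici : Prop := ∀ (tupla_competizioni : List (String × String × Int × Int)), Dom_competizione_con_meno_giudici tupla_competizioni → Spec_competizione_con_meno_giudici tupla_competizioni (competizione_con_meno_giudici tupla_competizioni)

-- ===== LEMMAS AND PROOFS =====

-- running minimum (A's first loop)
def pvMin (a : Int) (t : List (String × String × Int × Int)) : Int :=
  t.foldl (fun m x => if x.2.2.2 < m then x.2.2.2 else m) a

-- optional last match (for reasoning about the overwrite loops)
def pvLM (M : Int) (o : Option (String × String × Int × Int)) (t : List (String × String × Int × Int)) :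
    Option (String × String × Int × Int) :=
  t.foldl (fun o x => if M = x.2.2.2 then some (x.1, x.2.1, x.2.2.1, x.2.2.2) else o) o

lemma pvMin_cons (a : Int) (x : String × String × Int × Int) (t : List (String × String × Int × Int)) :
    pvMin a (x :: t) = pvMin (if x.2.2.2 < a then x.2.2.2 else a) t := rfl

lemma pvLM_cons (M : Int) (o : Option (String × String × Int × Int)) (x : String × String × Int × Int)
    (t : List (String × String × Int × Int)) :
    pvLM M o (x :: t) = pvLM M (if M = x.2.2.2 then some (x.1, x.2.1, x.2.2.1, x.2.2.2) else o) t := rfl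

lemma pvLM_shift (M : Int) (t : List (String × String × Int × Int)) :
    ∀ o, pvLM M o t = match pvLM M none t with | some y => some y | none => o := by
  induction t with
  | nil => intro o; simp [pvLM]
  | cons x t ih =>
    intro o
    rw [pvLM_cons M o x t, pvLM_cons M none x t]
    by_cases h : M = x.2.2.2
    · rw [if_pos h, if_pos h, ih (some (x.1, x.2.1, x.2.2.1, x.2.2.2))]
      cases pvLM M none t <;> rfl
    · rw [if_neg h, if_neg h]; exact ih o

lemma pvLM_getD (M : Int) (o : Option (String × String × Int × Int))
    (t : List (String × String × Int × Int)) (r0 : String × String × Int × Int) :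
    (pvLM M o t).getD r0 = match pvLM M none t with | some y => y | none => o.getD r0 := by
  conv_lhs => rw [pvLM_shift]
  cases pvLM M none t <;> rfl

lemma pvLM_isSome (M : Int) (t : List (String × String × Int × Int))
    (h : ∃ y ∈ t, y.2.2.2 = M) : (pvLM M none t).isSome := by
  induction t with
  | nil => simp at h
  | cons x t ih =>
    rcases h with ⟨y, hy, hv⟩
    rw [pvLM_cons, pvLM_shift]
    rcases List.mem_cons.mp hy with rfl | hyt
    · cases hh : pvLM M none t
      · simp [← hv]
      · simp
    · have := ih ⟨y, hyt, hv⟩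
      cases hh : pvLM M none t
      · rw [hh] at this; simp at this
      · simp

lemma pvMin_le (t : List (String × String × Int × Int)) : ∀ a : Int, pvMin a t ≤ a := by
  induction t with
  | nil => intro a; simp [pvMin]
  | cons x t ih =>
    intro a
    rw [pvMin_cons]
    split_ifs with h
    · exact le_trans (ih _) (le_of_lt h)
    · exact ih a

lemma pvMin_reached (t : List (String × String × Int × Int)) :
    ∀ a : Int, pvMin a t = a ∨ ∃ y ∈ t, y.2.2.2 = pvMin a t := by
  induction t with
  | nil => intro a; left; rfl
  | cons x t ih =>
    intro a
    rw [pvMin_cons]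
    split_ifs with h
    · rcases ih x.2.2.2 with he | ⟨y, hy, hv⟩
      · right; exact ⟨x, List.mem_cons_self .., he.symm⟩
      · right; exact ⟨y, List.mem_cons_of_mem _ hy, hv⟩
    · rcases ih a with he | ⟨y, hy, hv⟩
      · left; exact he
      · right; exact ⟨y, List.mem_cons_of_mem _ hy, hv⟩

-- B's fold computes (running minimum, last element achieving it — default if none)
lemma B_invariant (t : List (String × String × Int × Int)) :
    ∀ (m0 : Int) (r0 : String × String × Int × Int),
      t.foldl
        (fun (st : Int × (String × String × Int × Int)) x =>
          if x.2.2.2 < st.1 then (x.2.2.2, (x.1, x.2.1, x.2.2.1, x.2.2.2))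
          else if x.2.2.2 = st.1 then (st.1, (x.1, x.2.1, x.2.2.1, x.2.2.2))
          else st)
        (m0, r0)
      = (pvMin m0 t, (pvLM (pvMin m0 t) none t).getD r0) := by
  induction t with
  | nil => intro m0 r0; simp [pvMin, pvLM]
  | cons x t ih =>
    intro m0 r0
    rw [List.foldl_cons, pvMin_cons]
    by_cases h1 : x.2.2.2 < m0
    · simp only [if_pos h1]
      rw [ih]
      congr 1
      rw [pvLM_cons, pvLM_getD _ (if pvMin x.2.2.2 t = x.2.2.2 then some (x.1, x.2.1, x.2.2.1, x.2.2.2) else none) t r0]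
      conv_lhs => rw [pvLM_getD]
      cases hh : pvLM (pvMin x.2.2.2 t) none t with
      | some y => rfl
      | none =>
        have hM : pvMin x.2.2.2 t = x.2.2.2 := by
          rcases pvMin_reached t x.2.2.2 with he | hex
          · exact he
          · have hs := pvLM_isSome _ t hex
            rw [hh] at hs; simp at hs
        simp [hM]
    · simp only [if_neg h1]
      by_cases h2 : x.2.2.2 = m0
      · simp only [if_pos h2]
        rw [ih]
        congr 1
        rw [pvLM_cons, pvLM_getD _ (if pvMin m0 t = x.2.2.2 then some (x.1, x.2.1, x.2.2.1, x.2.2.2) else none) t r0]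
        conv_lhs => rw [pvLM_getD]
        cases hh : pvLM (pvMin m0 t) none t with
        | some y => rfl
        | none =>
          have hM : pvMin m0 t = x.2.2.2 := by
            rcases pvMin_reached t m0 with he | hex
            · rw [he, h2]
            · have hs := pvLM_isSome _ t hex
              rw [hh] at hs; simp at hs
          simp [hM]
      · simp only [if_neg h2]
        rw [ih]
        congr 1
        have hne : pvMin m0 t ≠ x.2.2.2 := by
          have := pvMin_le t m0; omega
        rw [pvLM_cons, if_neg hne]

-- A's overwrite loop equals the optional last match with a default
lemma A_overwrite (M : Int) (t : List (String × String × Int × Int)) :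
    ∀ r0 : String × String × Int × Int,
      t.foldl (fun r x => if M = x.2.2.2 then (x.1, x.2.1, x.2.2.1, x.2.2.2) else r) r0
      = (pvLM M none t).getD r0 := by
  induction t with
  | nil => intro r0; simp [pvLM]
  | cons x t ih =>
    intro r0
    rw [List.foldl_cons, ih, pvLM_cons,
        pvLM_getD M (if M = x.2.2.2 then some (x.1, x.2.1, x.2.2.1, x.2.2.2) else none) t r0]
    cases hh : pvLM M none t with
    | some y => rfl
    | none => split_ifs <;> rfl

-- ===== VERDICT (by name: the statement is the Claim_ definition above) =====
theorem competizione_con_meno_giudici_spec : Claim_equal_competizione_con_meno_giudici := by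
  intro L _
  show competizione_con_meno_giudici L = competizione_con_meno_giudici_alt L
  unfold competizione_con_meno_giudici competizione_con_meno_giudici_alt
  rw [B_invariant]
  exact A_overwrite (pvMin 1000 L) L ("", "", 0, 0)
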